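-- pv_equiv track=rewrite | github.com/patrickgaskill/mtg | mtg.py | generalize_mana_cost
-- ===== SOURCE A (Python) =====
-- def generalize_mana_cost(mana_cost):
--     """
--     >>> generalize_mana_cost("{2}")
--     '{2}'
--     >>> generalize_mana_cost("{W}{W}")
--     '{M}{M}'
--     >>> generalize_mana_cost("{W}{U}{R}")
--     '{M}{N}{O}'
--     >>> generalize_mana_cost("{W}{U}{B}{R}{G}")
--     '{W}{U}{B}{R}{G}'
--     >>> generalize_mana_cost("{2/W}{2/U}")
--     '{2/M}{2/N}'
--     >>> generalize_mana_cost("{W/P}{W/U}{2/W}")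
--     '{M/P}{M/N}{2/M}'
--     """
--     generics = iter("MNOP")
--     color_map = {}
--
--     for c in mana_cost:
--         if c in "WUBRG" and c not in color_map:
--             try:
--                 color_map[c] = next(generics)
--             except StopIteration:
--                 return mana_cost
--
--     return mana_cost.translate(mana_cost.maketrans(color_map))
-- ===== SOURCE B (Python) =====
-- def generalize_mana_cost(mana_cost):
--     out = []
--     color_map = {}
--     generics = list("MNOP")
--     for c in mana_cost:
--         if c in "WUBRG":
--             g = color_map.get(c)
--             if g is None:
--                 if not generics:
--                     return mana_cost
--                 g = generics.pop(0)
--                 color_map[c] = g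
--             out.append(g)
--         else:
--             out.append(c)
--     return "".join(out)
-- ===== Notes on version B (the rewrite author's own statement) =====
-- stated objective: alternative
-- what changed: A builds the full color map in a first pass and then translates the whole string in a second; B is a single fused pass that assigns generics on first sight of a color and emits the substituted output directly, returning the original string as soon as a fifth distinct color appears.
import Mathlib
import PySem

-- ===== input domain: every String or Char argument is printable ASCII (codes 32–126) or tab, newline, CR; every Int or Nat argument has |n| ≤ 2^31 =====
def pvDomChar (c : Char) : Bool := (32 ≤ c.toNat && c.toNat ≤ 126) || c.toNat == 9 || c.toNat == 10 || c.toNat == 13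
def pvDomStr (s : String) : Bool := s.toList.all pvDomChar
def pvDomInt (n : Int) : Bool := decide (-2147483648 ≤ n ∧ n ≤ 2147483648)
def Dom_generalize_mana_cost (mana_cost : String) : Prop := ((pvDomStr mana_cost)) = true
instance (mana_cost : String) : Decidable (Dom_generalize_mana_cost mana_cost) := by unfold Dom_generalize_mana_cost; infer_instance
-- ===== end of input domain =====

-- B fuses A's build-map-then-translate two-pass structure into one pass that emits the
-- substituted output directly and bails out the moment a fifth distinct color appears (objective: alternative).

-- ===== PORT A =====
-- the string "WUBRG" as characters ('c in "WUBRG"' for a single char = membership)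
def pvColors : List Char := ['W', 'U', 'B', 'R', 'G']

-- A's first loop: for c in mana_cost, assign the next generic of gs ("MNOP") to each new
-- color; none = the StopIteration path (return mana_cost)
def gmcBuild : List Char → List Char → PySem.Dict Char Char → Option (PySem.Dict Char Char)
  | [], _, m => some m
  | c :: cs, gs, m =>
    if pvColors.contains c && !(PySem.Dict.contains m c) then
      match gs with
      | [] => none
      | g :: gs' => gmcBuild cs gs' (m.insert c g)
    else gmcBuild cs gs m

def generalize_mana_cost (mana_cost : String) : String :=
  match gmcBuild mana_cost.toList ['M', 'N', 'O', 'P'] PySem.Dict.empty with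
  | none => mana_cost
  -- str.translate(str.maketrans(color_map)): each char replaced by its mapping, kept if unmapped (exact here: all keys and values are single chars)
  | some m => String.ofList (mana_cost.toList.map (fun c => m.getD c c))

-- ===== PORT B =====
-- B's single loop: acc is the 'out' list; returns orig on the five-colors bailout
def gmcLoop (orig : String) : List Char → List Char → PySem.Dict Char Char → List Char → String
  | [], _, _, acc => String.ofList acc
  | c :: cs, gs, m, acc =>
    if pvColors.contains c then
      match PySem.Dict.get? m c with
      | some g => gmcLoop orig cs gs m (acc ++ [g])
      | none =>
        match gs with
        | [] => orig
        | g :: gs' => gmcLoop orig cs gs' (m.insert c g) (acc ++ [g])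
    else gmcLoop orig cs gs m (acc ++ [c])

def generalize_mana_cost_alt (mana_cost : String) : String :=
  gmcLoop mana_cost mana_cost.toList ['M', 'N', 'O', 'P'] PySem.Dict.empty []

-- ===== PRECONDITION & SPEC =====
def Spec_generalize_mana_cost (mana_cost : String) (out : String) : Prop := out = generalize_mana_cost_alt mana_cost
instance (mana_cost : String) (out : String) : Decidable (Spec_generalize_mana_cost mana_cost out) := by unfold Spec_generalize_mana_cost; infer_instance

-- ===== CLAIM (what is proved, stated in full; the proofs are below) =====
def Claim_equal_generalize_mana_cost : Prop := ∀ (mana_cost : String), Dom_generalize_mana_cost mana_cost → Spec_generalize_mana_cost mana_cost (generalize_mana_cost mana_cost)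

-- ===== LEMMAS AND PROOFS =====

-- one unfolding step of each loop on a cons cell (definitional)
lemma gmcBuild_cons (a : Char) (cs gs : List Char) (m : PySem.Dict Char Char) :
    gmcBuild (a :: cs) gs m =
      if pvColors.contains a && !(PySem.Dict.contains m a) then
        match gs with
        | [] => none
        | g :: gs' => gmcBuild cs gs' (m.insert a g)
      else gmcBuild cs gs m := rfl

lemma gmcLoop_cons (orig : String) (a : Char) (cs gs : List Char) (m : PySem.Dict Char Char) (acc : List Char) :
    gmcLoop orig (a :: cs) gs m acc =
      if pvColors.contains a then
        match PySem.Dict.get? m a with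
        | some g => gmcLoop orig cs gs m (acc ++ [g])
        | none =>
          match gs with
          | [] => orig
          | g :: gs' => gmcLoop orig cs gs' (m.insert a g) (acc ++ [g])
      else gmcLoop orig cs gs m (acc ++ [a]) := rfl

-- the final map extends any intermediate map (keys are only ever added, never overwritten)
lemma gmcBuild_extends : ∀ (cs gs : List Char) (m M : PySem.Dict Char Char),
    gmcBuild cs gs m = some M → ∀ c v, m.get? c = some v → M.get? c = some v := by
  intro cs
  induction cs with
  | nil => intro gs m M h c v hv; simp [gmcBuild] at h; subst h; exact hv
  | cons a cs ih =>
    intro gs m M h c v hv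
    rw [gmcBuild_cons] at h
    split at h
    · next hcond =>
      match gs, h with
      | g :: gs', h =>
        refine ih gs' (m.insert a g) M h c v ?_
        rcases eq_or_ne c a with rfl | hne
        · simp_all [PySem.Dict.contains_eq_isSome_get?]
        · rwa [PySem.Dict.get?_insert_of_ne _ _ hne]
    · exact ih gs m M h c v hv

-- the map only ever holds colors as keys
lemma gmcBuild_colors : ∀ (cs gs : List Char) (m M : PySem.Dict Char Char),
    gmcBuild cs gs m = some M →
    (∀ c, (m.get? c).isSome → pvColors.contains c) →
    ∀ c, (M.get? c).isSome → pvColors.contains c := by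
  intro cs
  induction cs with
  | nil => intro gs m M h hm; simp [gmcBuild] at h; subst h; exact hm
  | cons a cs ih =>
    intro gs m M h hm
    rw [gmcBuild_cons] at h
    split at h
    · next hcond =>
      match gs, h with
      | g :: gs', h =>
        refine ih gs' (m.insert a g) M h ?_
        intro c hc
        rcases eq_or_ne c a with rfl | hne
        · exact (Bool.and_eq_true .. ▸ hcond).1
        · exact hm c (by rwa [PySem.Dict.get?_insert_of_ne _ _ hne] at hc)
    · exact ih gs m M h hm

-- key invariant: the fused loop agrees with (build; translate) from any common state
lemma gmcLoop_eq : ∀ (cs gs : List Char) (m : PySem.Dict Char Char) (acc : List Char) (orig : String),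
    (∀ c, (m.get? c).isSome → pvColors.contains c) →
    (∀ M, gmcBuild cs gs m = some M →
        gmcLoop orig cs gs m acc = String.ofList (acc ++ cs.map (fun c => M.getD c c))) ∧
    (gmcBuild cs gs m = none → gmcLoop orig cs gs m acc = orig) := by
  intro cs
  induction cs with
  | nil =>
    intro gs m acc orig _
    constructor
    · intro M h; simp [gmcBuild] at h; subst h; simp [gmcLoop]
    · intro h; simp [gmcBuild] at h
  | cons a cs ih =>
    intro gs m acc orig hm
    by_cases hcol : pvColors.contains a
    · cases hget : PySem.Dict.get? m a with
      | some g =>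
        have hcond : (pvColors.contains a && !(PySem.Dict.contains m a)) = false := by
          simp [PySem.Dict.contains_eq_isSome_get?, hget]
        constructor
        · intro M h
          rw [gmcBuild_cons, if_neg (ne_true_of_eq_false hcond)] at h
          have hMg := gmcBuild_extends cs gs m M h a g hget
          rw [gmcLoop_cons, if_pos hcol, hget]
          dsimp only
          rw [(ih gs m (acc ++ [g]) orig hm).1 M h]
          simp [PySem.Dict.getD_eq_get?_getD, hMg]
        · intro h
          rw [gmcBuild_cons, if_neg (ne_true_of_eq_false hcond)] at h
          rw [gmcLoop_cons, if_pos hcol, hget]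
          dsimp only
          exact (ih gs m (acc ++ [g]) orig hm).2 h
      | none =>
        have hcond : (pvColors.contains a && !(PySem.Dict.contains m a)) = true := by
          simp only [PySem.Dict.contains_eq_isSome_get?, hget, Option.isSome_none,
            Bool.not_false, Bool.and_true]
          exact hcol
        cases gs with
        | nil =>
          constructor
          · intro M h
            rw [gmcBuild_cons, if_pos hcond] at h
            simp at h
          · intro _
            rw [gmcLoop_cons, if_pos hcol, hget]
        | cons g gs' =>
          have hm' : ∀ c, ((m.insert a g).get? c).isSome → pvColors.contains c := by
            intro c hc
            rcases eq_or_ne c a with rfl | hne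
            · exact hcol
            · exact hm c (by rwa [PySem.Dict.get?_insert_of_ne _ _ hne] at hc)
          constructor
          · intro M h
            rw [gmcBuild_cons, if_pos hcond] at h
            have hMg := gmcBuild_extends cs gs' (m.insert a g) M h a g
              (PySem.Dict.get?_insert_self _ _ _)
            rw [gmcLoop_cons, if_pos hcol, hget]
            dsimp only
            rw [(ih gs' (m.insert a g) (acc ++ [g]) orig hm').1 M h]
            simp [PySem.Dict.getD_eq_get?_getD, hMg]
          · intro h
            rw [gmcBuild_cons, if_pos hcond] at h
            rw [gmcLoop_cons, if_pos hcol, hget]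
            dsimp only
            exact (ih gs' (m.insert a g) (acc ++ [g]) orig hm').2 h
    · have hcond : (pvColors.contains a && !(PySem.Dict.contains m a)) = false := by
        apply Bool.eq_false_iff.mpr
        intro hc
        exact hcol (Bool.and_eq_true .. ▸ hc).1
      constructor
      · intro M h
        rw [gmcBuild_cons, if_neg (ne_true_of_eq_false hcond)] at h
        have hMa : M.get? a = none := by
          cases hMa : M.get? a with
          | none => rfl
          | some v => exact absurd (gmcBuild_colors cs gs m M h hm a (by simp [hMa])) hcol
        rw [gmcLoop_cons, if_neg hcol,
          (ih gs m (acc ++ [a]) orig hm).1 M h]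
        simp [PySem.Dict.getD_eq_get?_getD, hMa]
      · intro h
        rw [gmcBuild_cons, if_neg (ne_true_of_eq_false hcond)] at h
        rw [gmcLoop_cons, if_neg hcol]
        exact (ih gs m (acc ++ [a]) orig hm).2 h

-- ===== VERDICT (by name: the statement is the Claim_ definition above) =====
theorem generalize_mana_cost_spec : Claim_equal_generalize_mana_cost := by
  intro mana_cost _
  unfold Spec_generalize_mana_cost generalize_mana_cost generalize_mana_cost_alt
  have h := gmcLoop_eq mana_cost.toList ['M', 'N', 'O', 'P'] PySem.Dict.empty [] mana_cost
    (by intro c hc; simp [PySem.Dict.get?_empty] at hc)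
  cases hb : gmcBuild mana_cost.toList ['M', 'N', 'O', 'P'] PySem.Dict.empty with
  | none => rw [h.2 hb]
  | some M => rw [h.1 M hb]; simp
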